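-- pv_equiv track=rewrite | github.com/judy2k/advent-of-code-2018 | day_05/python/part1.py | process
-- ===== SOURCE A (Python) =====
-- def process(s):
--     done = []
--     to_do = list(reversed(s))
--     while to_do:
--         a = to_do.pop()
--         if to_do:
--             b = to_do[-1]
--             if a != b and a.lower() == b.lower():
--                 to_do.pop()
--                 if done:
--                     to_do.append(done.pop())
--             else:
--                 done.append(a)
--         else:
--             done.append(a)
--     return len(done)
-- ===== SOURCE B (Python) =====
-- def process(s):
--     stack = []
--     for c in s:
--         if stack and stack[-1] != c and stack[-1].lower() == c.lower():
--             stack.pop()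
--         else:
--             stack.append(c)
--     return len(stack)
-- ===== Notes on version B (the rewrite author's own statement) =====
-- stated objective: simpler
-- what changed: Replaces the two-container loop (to_do worklist popped from the end, with a settled element re-queued from done after every reaction) by the canonical single forward scan over s maintaining one stack and popping on reaction; same reaction predicate, so identical results.
import Mathlib
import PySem

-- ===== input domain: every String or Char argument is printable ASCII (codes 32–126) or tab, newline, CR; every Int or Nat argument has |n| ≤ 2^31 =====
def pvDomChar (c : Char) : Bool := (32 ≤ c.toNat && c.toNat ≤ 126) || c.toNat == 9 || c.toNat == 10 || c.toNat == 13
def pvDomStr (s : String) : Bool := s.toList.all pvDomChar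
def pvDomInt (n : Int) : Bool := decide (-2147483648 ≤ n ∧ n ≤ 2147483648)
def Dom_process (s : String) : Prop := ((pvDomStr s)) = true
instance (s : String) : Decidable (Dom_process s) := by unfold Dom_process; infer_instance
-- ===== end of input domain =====

-- B replaces A's two-container worklist loop by the canonical single-stack forward scan
-- (simpler decomposition, same reaction predicate, same result).

-- reaction predicate: a != b and a.lower() == b.lower()  (on one-char strings = chars)
def react (a b : Char) : Bool := a != b && PySem.Chars.lowerChar a == PySem.Chars.lowerChar b

-- ===== PORT A =====
-- A's `while to_do` loop.  Both Python lists are touched only at their ends, so each is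
-- stored with that end at the Lean list HEAD: `to_do` head = Python's to_do[-1]
-- (so `to_do = list(reversed(s))` is just s.toList and pop() is the head), and `done`
-- head = Python's done[-1] (append = cons, pop = head); len is unaffected.
def processLoop (done to_do : List Char) : List Char :=
  match to_do with
  | [] => done
  | a :: rest =>
    match rest with
    | [] => a :: done                       -- to_do empty after pop: done.append(a)
    | b :: rest' =>
      if react a b then
        match done with
        | d :: done' => processLoop done' (d :: rest')   -- to_do.pop(); to_do.append(done.pop())
        | [] => processLoop [] rest'
      else
        processLoop (a :: done) (b :: rest')             -- done.append(a)
termination_by done.length + 2 * to_do.length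
decreasing_by all_goals (simp_all; try omega)

def process (s : String) : Int := (processLoop [] s.toList).length

-- ===== PORT B =====
-- one stack, top at the Lean list head (Python's stack[-1])
def stepB (stack : List Char) (c : Char) : List Char :=
  match stack with
  | t :: rest => if t != c && PySem.Chars.lowerChar t == PySem.Chars.lowerChar c then rest else c :: t :: rest
  | [] => [c]

def process_alt (s : String) : Int := (s.toList.foldl stepB []).length

-- ===== PRECONDITION & SPEC =====
def Spec_process (s : String) (out : Int) : Prop := out = process_alt s
instance (s : String) (out : Int) : Decidable (Spec_process s out) := by unfold Spec_process; infer_instance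

-- ===== CLAIM (what is proved, stated in full; the proofs are below) =====
def Claim_equal_process : Prop := ∀ (s : String), Dom_process s → Spec_process s (process s)

-- ===== LEMMAS AND PROOFS =====

theorem react_comm (a b : Char) : react a b = react b a := by
  simp [react, bne_comm, Bool.beq_comm]

theorem stepB_eq_react (stack : List Char) (c : Char) :
    stepB stack c = match stack with
      | t :: rest => if react t c then rest else c :: t :: rest
      | [] => [c] := by
  cases stack <;> simp [stepB, react]

-- unfolded equation of A's loop on a two-or-more-element worklist
theorem processLoop_cons2 (done : List Char) (a b : Char) (rest' : List Char) :
    processLoop done (a :: b :: rest') =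
      if react a b then
        (match done with
         | d :: done' => processLoop done' (d :: rest')
         | [] => processLoop [] rest')
      else processLoop (a :: done) (b :: rest') := by
  rw [processLoop.eq_def]

-- invariant carried through A's loop: done has no adjacent reacting pair (NoReactAdj),
-- and its top does not react with the next element of to_do
def NoReactAdj : List Char → Prop
  | [] => True
  | [_] => True
  | a :: b :: rest => react a b = false ∧ NoReactAdj (b :: rest)

def AInv (done to_do : List Char) : Prop :=
  NoReactAdj done ∧
  (match done, to_do with
   | d :: _, r :: _ => react d r = false
   | _, _ => True)

theorem AInv_nil (l : List Char) : AInv [] l :=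
  ⟨trivial, by cases l <;> trivial⟩

theorem processLoop_eq_foldl (done to_do : List Char) (h : AInv done to_do) :
    processLoop done to_do = to_do.foldl stepB done := by
  induction done, to_do using processLoop.induct with
  | case1 done => simp [processLoop]
  | case2 done a =>
    simp only [processLoop, List.foldl, stepB_eq_react]
    obtain ⟨h1, h2⟩ := h
    cases done with
    | nil => rfl
    | cons d done' => try simp only at h2
                      simp [h2]
  | case3 a b rest' hr d done' ih =>
    obtain ⟨h1, h2⟩ := h
    try simp only at h2
    have hinv' : AInv done' (d :: rest') := by
      cases done' with
      | nil => exact AInv_nil _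
      | cons e done'' =>
        obtain ⟨hde, h1'⟩ := h1
        exact ⟨h1', by simpa [react_comm e d] using hde⟩
    rw [processLoop_cons2, if_pos hr]
    show processLoop done' (d :: rest') = List.foldl stepB (d :: done') (a :: b :: rest')
    rw [ih hinv']
    have lhs : List.foldl stepB (d :: done') (a :: b :: rest') = List.foldl stepB (d :: done') rest' := by
      simp [List.foldl, stepB_eq_react, h2, hr]
    have rhs : List.foldl stepB done' (d :: rest') = List.foldl stepB (d :: done') rest' := by
      simp only [List.foldl, stepB_eq_react]
      cases done' with
      | nil => rfl
      | cons e done'' =>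
        have he : react e d = false := by simpa [react_comm e d] using h1.1
        simp [he]
    rw [rhs, lhs]
  | case4 a b rest' hr ih =>
    rw [processLoop_cons2, if_pos hr, ih (AInv_nil rest')]
    simp only [List.foldl, stepB_eq_react, if_pos hr]
  | case5 done a b rest' hr ih =>
    obtain ⟨h1, h2⟩ := h
    have hrb : react a b = false := by simpa using hr
    have hinv' : AInv (a :: done) (b :: rest') := by
      refine ⟨?_, hrb⟩
      cases done with
      | nil => trivial
      | cons d done' =>
        try simp only at h2
        exact ⟨by simpa [react_comm] using h2, h1⟩
    rw [processLoop_cons2, if_neg (by simp [hrb]), ih hinv']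
    conv_rhs => rw [List.foldl_cons]
    congr 1
    cases done with
    | nil => rfl
    | cons d done' => try simp only at h2
                      simp [stepB_eq_react, h2]

-- ===== VERDICT (by name: the statement is the Claim_ definition above) =====
theorem process_spec : Claim_equal_process := by
  intro s _
  unfold Spec_process process process_alt
  rw [processLoop_eq_foldl [] s.toList (AInv_nil s.toList)]
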